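-- pv_equiv track=rewrite | github.com/Huskyez/Uni | Sem5/LFTC/lab1/analizor.py | separateProgram
-- ===== SOURCE A (Python) =====
-- def separateProgram(program):
--
-- 	declaration_list = []
-- 	instruction_list = []
--
-- 	inDecl = True
-- 	for s in program:
-- 		if s == "{":
-- 			inDecl = False
-- 		if inDecl:
-- 			declaration_list.append(s)
-- 		else:
-- 			instruction_list.append(s)
--
-- 	return declaration_list, instruction_list
-- ===== SOURCE B (Python) =====
-- def separateProgram(program):
--     if "{" not in program:
--         return list(program), []
--     i = program.index("{")
--     return program[:i], program[i:]
-- ===== Notes on version B (the rewrite author's own statement) =====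
-- stated objective: simpler
-- what changed: B finds the first '{' once with list.index and returns the two slices around it, instead of threading an inDecl flag through a loop that appends element by element.
import Mathlib
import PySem

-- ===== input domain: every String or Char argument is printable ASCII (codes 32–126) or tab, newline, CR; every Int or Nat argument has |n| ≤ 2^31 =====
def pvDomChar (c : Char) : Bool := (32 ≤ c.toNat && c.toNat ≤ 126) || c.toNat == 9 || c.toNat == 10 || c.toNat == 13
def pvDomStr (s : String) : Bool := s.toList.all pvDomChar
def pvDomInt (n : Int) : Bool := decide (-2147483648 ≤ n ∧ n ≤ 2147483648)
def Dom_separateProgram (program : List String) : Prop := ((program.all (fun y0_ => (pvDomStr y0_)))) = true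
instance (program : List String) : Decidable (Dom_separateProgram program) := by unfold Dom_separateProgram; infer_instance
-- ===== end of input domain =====

-- B replaces A's flag-threading loop by one index lookup and two slices (objective: simpler).

-- ===== PORT A =====
-- loop state: (declaration_list, instruction_list, inDecl)
def separateProgramStep (st : List String × List String × Bool) (s : String) :
    List String × List String × Bool :=
  let inDecl := if s = "{" then false else st.2.2
  if inDecl then (st.1 ++ [s], st.2.1, inDecl)
  else (st.1, st.2.1 ++ [s], inDecl)

def separateProgram (program : List String) : List String × List String :=
  let st := program.foldl separateProgramStep ([], [], true)
  (st.1, st.2.1)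

-- ===== PORT B =====
def separateProgram_alt (program : List String) : List String × List String :=
  if "{" ∈ program then
    match PySem.List.index? program "{" with
    | some i => (PySem.List.slice program none (some (i : Int)),
                 PySem.List.slice program (some (i : Int)) none)
    | none => (program, [])
  else (program, [])

-- ===== PRECONDITION & SPEC =====
def Spec_separateProgram (program : List String) (out : List String × List String) : Prop := out = separateProgram_alt program
instance (program : List String) (out : List String × List String) : Decidable (Spec_separateProgram program out) := by unfold Spec_separateProgram; infer_instance

-- ===== CLAIM (what is proved, stated in full; the proofs are below) =====
def Claim_equal_separateProgram : Prop := ∀ (program : List String), Dom_separateProgram program → Spec_separateProgram program (separateProgram program)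

-- ===== LEMMAS AND PROOFS =====

-- once inDecl is false it stays false and everything goes to the instruction list
lemma loopA_false (p : List String) (d i : List String) :
    p.foldl separateProgramStep (d, i, false) = (d, i ++ p, false) := by
  induction p generalizing i with
  | nil => simp
  | cons s rest ih =>
      have hstep : separateProgramStep (d, i, false) s = (d, i ++ [s], false) := by
        simp [separateProgramStep]
      rw [List.foldl_cons, hstep, ih]
      simp

-- while inDecl is true the loop splits at the first "{"
lemma loopA_true (p : List String) (d i : List String) :
    p.foldl separateProgramStep (d, i, true) =
      (d ++ p.takeWhile (fun s => s ≠ "{"), i ++ p.dropWhile (fun s => s ≠ "{"),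
        !(p.contains "{")) := by
  induction p generalizing d i with
  | nil => simp
  | cons s rest ih =>
      by_cases hs : s = "{"
      · subst hs
        have hstep : separateProgramStep (d, i, true) "{" = (d, i ++ ["{"], false) := by
          simp [separateProgramStep]
        rw [List.foldl_cons, hstep, loopA_false]
        simp
      · have hstep : separateProgramStep (d, i, true) s = (d ++ [s], i, true) := by
          simp [separateProgramStep, hs]
        rw [List.foldl_cons, hstep, ih]
        simp [hs]
        intro _; exact fun h => hs h.symm

-- B computes the same takeWhile/dropWhile split
lemma altEq (p : List String) :
    separateProgram_alt p =
      (p.takeWhile (fun s => s ≠ "{"), p.dropWhile (fun s => s ≠ "{")) := by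
  induction p with
  | nil => simp [separateProgram_alt]
  | cons x xs ih =>
      by_cases hx : x = "{"
      · subst hx
        have hidx : PySem.List.index? ("{" :: xs) "{" = some 0 :=
          PySem.List.index?_cons_self "{" xs
        unfold separateProgram_alt
        rw [if_pos (List.mem_cons_self), hidx]
        dsimp only
        rw [PySem.List.slice_to_natCast, PySem.List.slice_from_natCast]
        simp
      · by_cases hm : "{" ∈ xs
        · obtain ⟨j, hj⟩ :=
            Option.isSome_iff_exists.1 ((PySem.List.index?_isSome_iff xs "{").2 hm)
          have hrec : separateProgram_alt xs =
              (PySem.List.slice xs none (some (j : Int)),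
               PySem.List.slice xs (some (j : Int)) none) := by
            unfold separateProgram_alt
            rw [if_pos hm, hj]
          rw [ih] at hrec
          have htake : xs.takeWhile (fun s => s ≠ "{") = xs.take j := by
            have h1 := congrArg Prod.fst hrec
            rw [PySem.List.slice_to_natCast] at h1
            simpa using h1
          have hdrop : xs.dropWhile (fun s => s ≠ "{") = xs.drop j := by
            have h2 := congrArg Prod.snd hrec
            rw [PySem.List.slice_from_natCast] at h2
            simpa using h2
          have hidx : PySem.List.index? (x :: xs) "{" = some (j + 1) := by
            rw [PySem.List.index?_cons_of_ne xs hx, hj]; rfl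
          unfold separateProgram_alt
          rw [if_pos (List.mem_cons_of_mem _ hm), hidx]
          dsimp only
          rw [PySem.List.slice_to_natCast, PySem.List.slice_from_natCast]
          simp only [ne_eq, decide_not] at htake hdrop
          simp [hx, htake, hdrop]
        · have hmem : "{" ∉ x :: xs := by simp [Ne.symm hx, hm]
          have hthis : separateProgram_alt xs = (xs, []) := by
            unfold separateProgram_alt
            rw [if_neg hm]
          rw [ih] at hthis
          have h1 : xs.takeWhile (fun s => s ≠ "{") = xs := by
            have := congrArg Prod.fst hthis
            simpa using this
          have h2 : xs.dropWhile (fun s => s ≠ "{") = [] := by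
            have := congrArg Prod.snd hthis
            simpa using this
          unfold separateProgram_alt
          rw [if_neg hmem]
          simp only [List.takeWhile_cons, List.dropWhile_cons]
          simp only [ne_eq, decide_not] at h1 h2
          simp [hx, h1, h2]

-- ===== VERDICT (by name: the statement is the Claim_ definition above) =====
theorem separateProgram_spec : Claim_equal_separateProgram := by
  intro program _
  unfold Spec_separateProgram
  rw [altEq]
  simp [separateProgram, loopA_true]
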